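-- pv_equiv track=rewrite | github.com/logansundaram/ai_agent | rag_test_harness.py | has_decline_language
-- ===== SOURCE A (Python) =====
-- def has_decline_language(answer: str) -> bool:
--     patterns = [
--         "i don't know",
--         "not enough information",
--         "unable to",
--         "cannot find",
--         "no sufficient evidence",
--     ]
--     return any(p in answer.lower() for p in patterns)
-- ===== SOURCE B (Python) =====
-- def has_decline_language(answer: str) -> bool:
--     patterns = (
--         "i don't know",
--         "not enough information",
--         "unable to",
--         "cannot find",
--         "no sufficient evidence",
--     )
--     s = answer.lower()
--     # single left-to-right sweep: at each position test whether any phrase starts there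
--     for i in range(len(s) + 1):
--         for p in patterns:
--             if s.startswith(p, i):
--                 return True
--     return False
-- ===== Notes on version B (the rewrite author's own statement) =====
-- stated objective: alternative
-- what changed: Replaces five independent substring-containment scans with a single left-to-right sweep over the lowercased answer that tests all five phrases as prefixes at each position.
import Mathlib
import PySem

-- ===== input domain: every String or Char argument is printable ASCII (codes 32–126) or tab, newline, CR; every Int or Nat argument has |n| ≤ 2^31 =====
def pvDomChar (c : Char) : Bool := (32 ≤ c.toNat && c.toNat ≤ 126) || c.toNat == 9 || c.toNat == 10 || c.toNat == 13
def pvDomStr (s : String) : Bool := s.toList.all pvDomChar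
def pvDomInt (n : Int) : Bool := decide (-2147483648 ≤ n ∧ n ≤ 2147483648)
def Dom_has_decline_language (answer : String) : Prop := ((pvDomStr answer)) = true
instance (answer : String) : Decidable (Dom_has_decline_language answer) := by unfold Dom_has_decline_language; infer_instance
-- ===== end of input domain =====

-- B replaces five independent substring scans by one left-to-right sweep testing all phrases as prefixes at each position (alternative decomposition, same cost).


-- ===== PORT A =====
def has_decline_language (answer : String) : Bool :=
  let patterns : List String :=
    ["i don't know", "not enough information", "unable to", "cannot find",
     "no sufficient evidence"]
  patterns.any (fun p => PySem.Str.isIn p (PySem.Str.lower answer))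

-- ===== PORT B =====
-- the phrase tuple of Source B, as char lists for the sweep
def pvPatterns : List (List Char) :=
  ["i don't know".toList, "not enough information".toList, "unable to".toList,
   "cannot find".toList, "no sufficient evidence".toList]

-- Source B's sweep: for each position i (i.e. each suffix, including the empty one),
-- test whether some pattern starts there (s.startswith(p, i))
def pvSweep (ps : List (List Char)) : List Char → Bool
  | [] => ps.any (fun p => p.isPrefixOf ([] : List Char))
  | c :: t => ps.any (fun p => p.isPrefixOf (c :: t)) || pvSweep ps t

def has_decline_language_alt (answer : String) : Bool :=
  pvSweep pvPatterns (PySem.Chars.lower answer.toList)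

-- ===== PRECONDITION & SPEC =====
def Spec_has_decline_language (answer : String) (out : Bool) : Prop := out = has_decline_language_alt answer
instance (answer : String) (out : Bool) : Decidable (Spec_has_decline_language answer out) := by unfold Spec_has_decline_language; infer_instance

-- ===== CLAIM (what is proved, stated in full; the proofs are below) =====
def Claim_equal_has_decline_language : Prop := ∀ (answer : String), Dom_has_decline_language answer → Spec_has_decline_language answer (has_decline_language answer)

-- ===== LEMMAS AND PROOFS =====
theorem pvIsIn_eq_decide (sub s : List Char) :
    PySem.Chars.isIn sub s = decide (sub <:+: s) := by
  by_cases h : sub <:+: s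
  · simp [h, (PySem.Chars.isIn_iff_infix sub s).mpr h]
  · simp [h, (PySem.Chars.isIn_eq_false_iff sub s).mpr h]

theorem pvSweep_eq_any_infix (ps : List (List Char)) (s : List Char) :
    pvSweep ps s = ps.any (fun p => decide (p <:+: s)) := by
  induction s with
  | nil => simp [pvSweep, List.any_eq, List.isPrefixOf_iff_prefix]
  | cons c t ih =>
      rw [pvSweep, ih, Bool.eq_iff_iff]
      simp only [Bool.or_eq_true, List.any_eq_true, decide_eq_true_eq,
        List.isPrefixOf_iff_prefix, List.infix_cons_iff]
      constructor
      · rintro (⟨p, hp, h'⟩ | ⟨p, hp, h'⟩)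
        · exact ⟨p, hp, Or.inl h'⟩
        · exact ⟨p, hp, Or.inr h'⟩
      · rintro ⟨p, hp, h' | h'⟩
        · exact Or.inl ⟨p, hp, h'⟩
        · exact Or.inr ⟨p, hp, h'⟩

-- ===== VERDICT (by name: the statement is the Claim_ definition above) =====
theorem has_decline_language_spec : Claim_equal_has_decline_language := by
  intro answer _
  show has_decline_language answer = has_decline_language_alt answer
  unfold has_decline_language has_decline_language_alt
  rw [pvSweep_eq_any_infix]
  simp only [List.any_cons, List.any_nil, pvPatterns]
  simp only [PySem.Str.isIn, PySem.Str.toList_lower, pvIsIn_eq_decide]
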